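-- pv_equiv track=rewrite | github.com/TanishqBhargava/Hackerrank_Solutions | Algorithm/Search/Gridland Metro.py | gridlandMetro
-- ===== SOURCE A (Python) =====
-- def gridlandMetro(n, m, k, track):
--     track.sort()                                        #1
--     out = n * m                                         #2
--     r0 = t1 = t2 = 0
--     for r, c1, c2 in track:                             #3
--         if r == r0 and c1 - 1 < t2: t2 = max(t2, c2)    #4
--         else:
--             out -= t2 - t1                              #5
--             r0, t1, t2 = r, c1 - 1, c2                  #6
--     return(out - t2 + t1)
-- ===== SOURCE B (Python) =====
-- def _row_cover(block):
--     # block: the track entries of one row, starts non-decreasing; returns the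
--     # number of covered columns (union of the merged intervals)
--     s = block[0][1] - 1
--     e = block[0][2]
--     total = 0
--     for _, c1, c2 in block[1:]:
--         if c1 - 1 < e:
--             e = max(e, c2)
--         else:
--             total += e - s
--             s, e = c1 - 1, c2
--     return total + e - s
--
--
-- def gridlandMetro(n, m, k, track):
--     track.sort()
--     covered = 0
--     i = 0
--     while i < len(track):
--         j = i
--         while j < len(track) and track[j][0] == track[i][0]:
--             j += 1
--         covered += _row_cover(track[i:j])
--         i = j
--     return n * m - covered
-- ===== Notes on version B (the rewrite author's own statement) =====
-- stated objective: alternative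
-- what changed: A does one pass over the sorted list with a three-variable run-state machine (r0,t1,t2) mutated across rows; B decomposes the task as sort, split the list into per-row blocks, compute each row's covered-column count with a standalone interval-merge helper, and subtract the summed cover from n*m.
-- intended difference: When the lexicographically least track entry lies in row 0 with start column <= 0, A's leftover initial loop state (r0=t1=t2=0) absorbs that entry into a phantom interval starting at column 0 and undercounts its columns (e.g. A returns 3 on (2,2,1,[(0,0,1)])), while B counts that row's columns like any other row's (returning 2), which is the intended count of uncovered cells. — e.g. on gridlandMetro(2, 2, 1, [(0, 0, 1)]): A returns 3, B returns 2
import Mathlib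
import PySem

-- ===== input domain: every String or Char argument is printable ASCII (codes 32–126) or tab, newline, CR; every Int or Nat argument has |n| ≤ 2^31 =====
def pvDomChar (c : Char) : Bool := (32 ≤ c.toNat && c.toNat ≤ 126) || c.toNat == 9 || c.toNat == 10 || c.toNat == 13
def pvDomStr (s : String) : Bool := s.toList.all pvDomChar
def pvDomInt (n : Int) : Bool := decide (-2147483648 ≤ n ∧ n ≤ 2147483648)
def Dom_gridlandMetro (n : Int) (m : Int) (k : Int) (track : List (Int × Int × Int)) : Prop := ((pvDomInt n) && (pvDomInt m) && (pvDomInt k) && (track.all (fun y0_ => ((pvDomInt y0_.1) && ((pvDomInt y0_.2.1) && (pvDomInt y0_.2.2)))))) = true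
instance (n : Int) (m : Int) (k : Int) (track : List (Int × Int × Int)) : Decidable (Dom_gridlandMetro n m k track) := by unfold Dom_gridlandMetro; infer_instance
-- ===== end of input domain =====

-- B re-implements A as sort, group the intervals by row, and sum per-row interval-merge
-- cover lengths (objective: alternative decomposition, same O(k log k) cost); both A and B
-- sort `track` in place (the equivalence proved here is about the return value).

-- ===== PORT A =====
-- track.sort()  — Python sorts the triples lexicographically (shared by both ports)
def sortTrack (track : List (Int × Int × Int)) : List (Int × Int × Int) :=
  PySem.List.sorted track (fun t => toLex (t.1, toLex (t.2.1, t.2.2))) false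

-- state = (out, r0, t1, t2), one step of A's for-loop (lines #4–#6)
def aStep (st : Int × Int × Int × Int) (p : Int × Int × Int) : Int × Int × Int × Int :=
  if p.1 == st.2.1 && p.2.1 - 1 < st.2.2.2 then
    (st.1, st.2.1, st.2.2.1, max st.2.2.2 p.2.2)
  else
    (st.1 - (st.2.2.2 - st.2.2.1), p.1, p.2.1 - 1, p.2.2)

def gridlandMetro (n : Int) (m : Int) (k : Int) (track : List (Int × Int × Int)) : Int :=
  let st := (sortTrack track).foldl aStep (n * m, 0, 0, 0)
  st.1 - st.2.2.2 + st.2.2.1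

-- ===== PORT B =====
-- Source B's _row_cover: fold over the tail of one row's block with (total, s, e)
def rowCoverGo (total s e : Int) : List (Int × Int × Int) → Int
  | [] => total + e - s
  | (_, c1, c2) :: rest =>
    if c1 - 1 < e then rowCoverGo total s (max e c2) rest
    else rowCoverGo (total + (e - s)) (c1 - 1) c2 rest

-- Source B's outer while-loop: split off the leading block of equal rows, cover it, recurse
def chunksCover : List (Int × Int × Int) → Int
  | [] => 0
  | x :: rest =>
    rowCoverGo 0 (x.2.1 - 1) x.2.2 (rest.takeWhile (fun y => y.1 == x.1)) +
      chunksCover (rest.dropWhile (fun y => y.1 == x.1))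
  termination_by l => l.length
  decreasing_by exact Nat.lt_succ_of_le (List.length_dropWhile_le _ _)

def gridlandMetro_alt (n : Int) (m : Int) (k : Int) (track : List (Int × Int × Int)) : Int :=
  n * m - chunksCover (sortTrack track)

-- ===== PRECONDITION & SPEC =====
-- If the lexicographically least track entry lies in row 0 with start column ≤ 0, A's
-- leftover initial loop state (r0 = t1 = t2 = 0) absorbs that entry into a phantom interval
-- starting at column 0 and undercounts its columns; B counts that row's columns like any
-- other row's, which is the intended behaviour.
def D_gridlandMetro (n : Int) (m : Int) (k : Int) (track : List (Int × Int × Int)) : Prop :=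
  ∃ t ∈ track, t.1 = 0 ∧ t.2.1 ≤ 0 ∧
    ∀ u ∈ track, t.1 < u.1 ∨ (t.1 = u.1 ∧ (t.2.1 < u.2.1 ∨ (t.2.1 = u.2.1 ∧ t.2.2 ≤ u.2.2)))
instance (n : Int) (m : Int) (k : Int) (track : List (Int × Int × Int)) : Decidable (D_gridlandMetro n m k track) := by
  unfold D_gridlandMetro; infer_instance

def Spec_gridlandMetro (n : Int) (m : Int) (k : Int) (track : List (Int × Int × Int)) (out : Int) : Prop :=
  ¬ D_gridlandMetro n m k track → out = gridlandMetro_alt n m k track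
instance (n : Int) (m : Int) (k : Int) (track : List (Int × Int × Int)) (out : Int) : Decidable (Spec_gridlandMetro n m k track out) := by
  unfold Spec_gridlandMetro; infer_instance

def pvDiffWitness_gridlandMetro : Int × Int × Int × (List (Int × Int × Int)) := (2, 2, 1, [(0, 0, 1)])
def pvDiffWitnessOut_gridlandMetro : Int × Int := (3, 2)

-- ===== CLAIM (what is proved, stated in full; the proofs are below) =====
def Claim_unchanged_gridlandMetro : Prop := ∀ (n : Int) (m : Int) (k : Int) (track : List (Int × Int × Int)), Dom_gridlandMetro n m k track → Spec_gridlandMetro n m k track (gridlandMetro n m k track)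
def Claim_changed_gridlandMetro : Prop := Dom_gridlandMetro (pvDiffWitness_gridlandMetro.1) (pvDiffWitness_gridlandMetro.2.1) (pvDiffWitness_gridlandMetro.2.2.1) (pvDiffWitness_gridlandMetro.2.2.2) ∧ D_gridlandMetro (pvDiffWitness_gridlandMetro.1) (pvDiffWitness_gridlandMetro.2.1) (pvDiffWitness_gridlandMetro.2.2.1) (pvDiffWitness_gridlandMetro.2.2.2) ∧ gridlandMetro (pvDiffWitness_gridlandMetro.1) (pvDiffWitness_gridlandMetro.2.1) (pvDiffWitness_gridlandMetro.2.2.1) (pvDiffWitness_gridlandMetro.2.2.2) = pvDiffWitnessOut_gridlandMetro.1 ∧ gridlandMetro_alt (pvDiffWitness_gridlandMetro.1) (pvDiffWitness_gridlandMetro.2.1) (pvDiffWitness_gridlandMetro.2.2.1) (pvDiffWitness_gridlandMetro.2.2.2) = pvDiffWitnessOut_gridlandMetro.2 ∧ pvDiffWitnessOut_gridlandMetro.1 ≠ pvDiffWitnessOut_gridlandMetro.2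

-- ===== LEMMAS AND PROOFS =====

-- the (closed sum, current start, current end) a row-block leaves behind
def rcState (s e : Int) : List (Int × Int × Int) → Int × Int × Int
  | [] => (0, s, e)
  | (_, c1, c2) :: rest =>
    if c1 - 1 < e then rcState s (max e c2) rest
    else
      ((rcState (c1 - 1) c2 rest).1 + (e - s),
       (rcState (c1 - 1) c2 rest).2.1, (rcState (c1 - 1) c2 rest).2.2)

theorem rowCoverGo_eq_rcState (g : List (Int × Int × Int)) : ∀ total s e,
    rowCoverGo total s e g =
      total + (rcState s e g).1 + (rcState s e g).2.2 - (rcState s e g).2.1 := by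
  induction g with
  | nil => intro total s e; simp [rowCoverGo, rcState]
  | cons p rest ih =>
    intro total s e
    obtain ⟨r, c1, c2⟩ := p
    by_cases hc : c1 - 1 < e
    · simp only [rowCoverGo, rcState, if_pos hc]
      exact ih ..
    · simp only [rowCoverGo, rcState, if_neg hc]
      rw [ih]
      ring

-- A's loop over a block whose entries all carry the current row r0
theorem aLoop_block (g : List (Int × Int × Int)) : ∀ (out r0 t1 t2 : Int),
    (∀ p ∈ g, p.1 = r0) →
    g.foldl aStep (out, r0, t1, t2) =
      (out - (rcState t1 t2 g).1, r0, (rcState t1 t2 g).2.1, (rcState t1 t2 g).2.2) := by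
  induction g with
  | nil => intro out r0 t1 t2 _; simp [rcState]
  | cons p rest ih =>
    intro out r0 t1 t2 hrow
    obtain ⟨r, c1, c2⟩ := p
    have hr : r = r0 := hrow (r, c1, c2) (by simp)
    have htail : ∀ p ∈ rest, p.1 = r0 := fun p hp => hrow p (List.mem_cons_of_mem _ hp)
    by_cases hc : c1 - 1 < t2
    · have hstep : aStep (out, r0, t1, t2) (r, c1, c2) = (out, r0, t1, max t2 c2) := by
        simp [aStep, hr, hc]
      rw [List.foldl_cons, hstep, ih out r0 t1 (max t2 c2) htail]
      simp only [rcState, if_pos hc]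
    · have hstep : aStep (out, r0, t1, t2) (r, c1, c2) = (out - (t2 - t1), r0, c1 - 1, c2) := by
        simp [aStep, hr, hc]
      rw [List.foldl_cons, hstep, ih (out - (t2 - t1)) r0 (c1 - 1) c2 htail]
      simp only [rcState, if_neg hc, Prod.mk.injEq, and_true]
      ring

theorem chunksCover_nil : chunksCover [] = 0 := by rw [chunksCover]

-- A's loop from a state the head element cannot merge into = B's chunked cover
theorem aLoop_chunks (L : List (Int × Int × Int)) : ∀ (out r0 t1 t2 : Int),
    (∀ hd ∈ L.head?, ¬(hd.1 = r0 ∧ hd.2.1 - 1 < t2)) →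
    (let st := L.foldl aStep (out, r0, t1, t2); st.1 - st.2.2.2 + st.2.2.1) =
      out - (t2 - t1) - chunksCover L := by
  induction L using chunksCover.induct with
  | case1 => intro out r0 t1 t2 _; simp [chunksCover_nil]; ring
  | case2 x rest ih =>
    intro out r0 t1 t2 hhd
    obtain ⟨r, c1, c2⟩ := x
    have hnm : ¬(r = r0 ∧ c1 - 1 < t2) := hhd (r, c1, c2) (by simp)
    have hstep : aStep (out, r0, t1, t2) (r, c1, c2) = (out - (t2 - t1), r, c1 - 1, c2) := by
      simp only [aStep]
      rw [if_neg]
      simp only [Bool.and_eq_true, beq_iff_eq, decide_eq_true_eq]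
      exact fun h => hnm ⟨h.1, h.2⟩
    have hsplit : rest.takeWhile (fun y => y.1 == r) ++ rest.dropWhile (fun y => y.1 == r) = rest :=
      List.takeWhile_append_dropWhile
    rw [List.foldl_cons, hstep]
    conv_lhs => rw [← hsplit]
    rw [List.foldl_append]
    rw [aLoop_block _ (out - (t2 - t1)) r (c1 - 1) c2
      (fun p hp => by simpa using List.mem_takeWhile_imp hp)]
    rw [ih]
    · rw [chunksCover, rowCoverGo_eq_rcState]
      ring_nf
    · intro hd hmem hcond
      have hne : rest.dropWhile (fun y : Int × Int × Int => y.1 == r) ≠ [] := by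
        intro h; rw [h] at hmem; simp at hmem
      have hhdeq : hd = (rest.dropWhile (fun y : Int × Int × Int => y.1 == r)).head hne := by
        rw [List.head?_eq_some_head hne] at hmem
        exact (Option.some_inj.mp (Option.mem_def.mp hmem)).symm
      have hfalse := List.head_dropWhile_not (fun y : Int × Int × Int => y.1 == r) hne
      rw [← hhdeq] at hfalse
      have : ¬ hd.1 = r := by simpa using hfalse
      exact this hcond.1

-- ¬D_ forces the head of the sorted list out of the phantom-merge case
theorem head_not_phantom (track : List (Int × Int × Int)) (hD : ¬ D_gridlandMetro 0 0 0 track)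
    {hd : Int × Int × Int} {t : List (Int × Int × Int)} (hL : sortTrack track = hd :: t) :
    ¬(hd.1 = 0 ∧ hd.2.1 - 1 < 0) := by
  rintro ⟨h1, h2⟩
  apply hD
  refine ⟨hd, ?_, h1, by omega, ?_⟩
  · have := PySem.List.mem_sorted (xs := track)
      (key := fun t => toLex (t.1, toLex (t.2.1, t.2.2))) (rev := false) (x := hd)
    rw [sortTrack] at hL
    exact this.mp (hL ▸ List.mem_cons_self ..)
  · intro u hu
    have hle := PySem.List.key_head_sorted_le track
      (fun t => toLex (t.1, toLex (t.2.1, t.2.2))) hL u hu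
    rw [Prod.Lex.le_iff] at hle
    rcases hle with h | ⟨he, hle2⟩
    · exact Or.inl h
    · refine Or.inr ⟨he, ?_⟩
      rw [Prod.Lex.le_iff] at hle2
      exact hle2

-- D_ does not depend on n, m, k
theorem D_indep (n m k n' m' k' : Int) (track : List (Int × Int × Int)) :
    D_gridlandMetro n m k track ↔ D_gridlandMetro n' m' k' track := Iff.rfl

-- ===== VERDICT (by name: the statement is the Claim_ definition above) =====
theorem gridlandMetro_spec : Claim_unchanged_gridlandMetro := by
  intro n m k track _ hD
  have hD0 : ¬ D_gridlandMetro 0 0 0 track := by rwa [D_indep 0 0 0 n m k]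
  unfold gridlandMetro gridlandMetro_alt
  cases hL : sortTrack track with
  | nil => simp [chunksCover_nil]
  | cons hd t =>
    have hc := aLoop_chunks (hd :: t) (n * m) 0 0 0
      (by intro p hp; simp only [List.head?_cons, Option.mem_some_iff] at hp
          subst hp; exact head_not_phantom track hD0 hL)
    rw [hc]
    ring

theorem gridlandMetro_changed : Claim_changed_gridlandMetro := by
  unfold Claim_changed_gridlandMetro
  refine ⟨by decide, by decide, by decide, ?_, by decide⟩
  show gridlandMetro_alt 2 2 1 [(0, 0, 1)] = 2
  have hs : sortTrack [(0, 0, 1)] = [(0, 0, 1)] := by decide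
  rw [gridlandMetro_alt, hs, chunksCover]
  norm_num [List.takeWhile, List.dropWhile, rowCoverGo, chunksCover_nil]
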